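-- pv_equiv track=rewrite | github.com/liyinnbw/DBNormalizer | api.py | candidate_keys
-- ===== SOURCE A (Python) =====
-- from itertools import combinations
--
-- def closure(R, F, S):
--     unused = [True for f in F]
--     closureSet = set(S)  # copy
--     fIdx = 0
--     while fIdx < len(F):
--         if unused[fIdx] and set(F[fIdx][0]) <= closureSet:
--             for a in F[fIdx][1]:
--                 closureSet.add(a)
--             unused[fIdx] = False
--             fIdx = 0
--         else:
--             fIdx += 1
--     result = list(closureSet)
--     return result
--
-- def candidate_keys(R, F):
--     # sort R so that subsets will be sorted
--     Rsort = sorted(R)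
--     # If the input iterable is sorted, the combination tuples will be produced in sorted order.
--     allSubSets = [list(x) for x in sum(
--         map(lambda r: list(combinations(Rsort, r)), range(1, len(Rsort)+1)), [])]
--     candidateKeys = []
--     for S in allSubSets:
--         Sset = set(S)
--         Splus = closure(Rsort, F, S)
--         if len(Splus) == len(Rsort):
--             isSuperKey = False
--             for candidate in candidateKeys:
--                 if candidate < Sset:
--                     isSuperKey = True
--                     break
--             if not isSuperKey:
--                 candidateKeys.append(Sset)
--     return candidateKeys #[list(s) for s in candidateKeys]
-- ===== SOURCE B (Python) =====
-- from itertools import combinations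
--
-- def _closure_size(F, S):
--     # size of the attribute closure of S, computed by counter propagation:
--     # cnt[i] = number of distinct LHS attributes of rule i not yet in the
--     # closure; occ maps each attribute to the rules whose LHS contains it.
--     # Each attribute enters the queue at most once, so each rule's counter
--     # is decremented at most once per LHS attribute.
--     occ = {}
--     cnt = []
--     for i, (lhs, rhs) in enumerate(F):
--         lset = set(lhs)
--         cnt.append(len(lset))
--         for a in lset:
--             occ.setdefault(a, []).append(i)
--     cl = set()
--     queue = []
--     for a in S:
--         if a not in cl:
--             cl.add(a)
--             queue.append(a)
--     for i, (lhs, rhs) in enumerate(F):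
--         if cnt[i] == 0:  # rules with empty LHS fire unconditionally
--             for b in rhs:
--                 if b not in cl:
--                     cl.add(b)
--                     queue.append(b)
--     while queue:
--         a = queue.pop()
--         for i in occ.get(a, []):
--             cnt[i] -= 1
--             if cnt[i] == 0:
--                 for b in F[i][1]:
--                     if b not in cl:
--                         cl.add(b)
--                         queue.append(b)
--     return len(cl)
--
-- def _is_minimal(F, S, n):
--     # the empty set is never a candidate (only nonempty subsets are keys),
--     # so a singleton superkey is always minimal
--     if len(S) == 1:
--         return True
--     for i in range(len(S)):
--         if _closure_size(F, S[:i] + S[i + 1:]) == n: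
--             return False
--     return True
--
-- def candidate_keys(R, F):
--     Rsort = sorted(R)
--     n = len(Rsort)
--     return [set(S) for r in range(1, n + 1) for S in combinations(Rsort, r)
--             if _closure_size(F, S) == n and _is_minimal(F, S, n)]
-- ===== Notes on version B (the rewrite author's own statement) =====
-- stated objective: alternative
-- what changed: B replaces A's accumulator-based pruning (scan previously found keys for a proper subset) by an independent per-subset remove-one-attribute minimality test expressed as a filter comprehension, and replaces A's restart-from-rule-0 fixpoint closure by a counter/queue attribute-propagation closure (per-rule count of missing LHS attributes, each attribute processed once).
-- outside the precondition, e.g. on candidate_keys(['A', 'A'], [(['A'], ['B'])]): A returns [{'A'}, {'A'}, {'A'}], B returns [{'A'}, {'A'}]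
import Mathlib
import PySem

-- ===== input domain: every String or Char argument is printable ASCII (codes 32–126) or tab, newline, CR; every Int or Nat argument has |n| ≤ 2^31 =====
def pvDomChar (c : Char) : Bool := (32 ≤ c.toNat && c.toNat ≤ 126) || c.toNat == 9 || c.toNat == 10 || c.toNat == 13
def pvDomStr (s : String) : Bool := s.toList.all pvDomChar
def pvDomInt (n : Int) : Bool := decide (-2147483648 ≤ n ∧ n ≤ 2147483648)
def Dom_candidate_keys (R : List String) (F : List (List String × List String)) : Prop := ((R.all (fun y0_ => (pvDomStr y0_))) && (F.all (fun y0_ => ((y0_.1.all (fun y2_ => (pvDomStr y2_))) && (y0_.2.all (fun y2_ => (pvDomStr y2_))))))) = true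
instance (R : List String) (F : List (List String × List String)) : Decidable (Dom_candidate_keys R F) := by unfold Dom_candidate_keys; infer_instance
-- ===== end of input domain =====

-- B replaces A's accumulator-pruned search by a filter over the same enumeration with a local
-- remove-one-attribute minimality test, and replaces A's restart-from-rule-0 closure by a
-- counter/queue attribute-propagation closure; objective: alternative algorithm, same output.
-- Equivalence is about the RETURN value; neither program observably mutates its arguments.

-- ===== PORT A =====

-- both Pythons call itertools.combinations(Rsort, r): its documented behaviour on a list —
-- the r-element subsequences, in lexicographic order of positions
def combos : List String → Nat → List (List String)
  | _, 0 => [[]]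
  | [], _ + 1 => []
  | x :: rest, r + 1 => (combos rest r).map (fun t => x :: t) ++ combos rest (r + 1)

-- Python 'candidate < Sset' on sets: proper subset
def pyLtSet (a b : PySem.Set String) : Bool :=
  PySem.Set.issubset a b && !(PySem.Set.issubset b a)

-- needed by closureLoop's termination: marking a still-unused rule used shrinks the measure
theorem count_set_false_lt (l : List Bool) (n : Nat) (h : n < l.length) (hg : l[n] = true) :
    (l.set n false).count true < l.count true := by
  induction l generalizing n with
  | nil => simp at h
  | cons a as ih =>
    cases n with
    | zero => simp_all
    | succ m =>
      simp only [List.set_cons_succ, List.count_cons]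
      have := ih m (by simpa using h) (by simpa using hg)
      omega

-- A's while loop in 'closure': state (unused, closureSet, fIdx)
def closureLoop (F : List (List String × List String)) (unused : List Bool)
    (cs : PySem.Set String) (fIdx : Nat) : PySem.Set String :=
  if h : fIdx < F.length then
    if h2 : (unused.getD fIdx false
        && PySem.Set.issubset (PySem.Set.ofList (F[fIdx].1)) cs) = true then
      closureLoop F (unused.set fIdx false) ((F[fIdx].2).foldl PySem.Set.add cs) 0
    else
      closureLoop F unused cs (fIdx + 1)
  else cs
termination_by (unused.count true, F.length - fIdx)
decreasing_by
  · have hb : unused.getD fIdx false = true := by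
      cases hba : unused.getD fIdx false with
      | true => rfl
      | false => rw [hba] at h2; simp at h2
    have hlt : fIdx < unused.length := by
      by_contra hc
      rw [List.getD_eq_default _ _ (by omega)] at hb
      exact Bool.false_ne_true hb
    have hget : unused[fIdx] = true := by
      rw [List.getD_eq_getElem _ _ hlt] at hb; exact hb
    exact Prod.Lex.left _ _ (count_set_false_lt unused fIdx hlt hget)
  · exact Prod.Lex.right _ (by omega)

-- closure(R, F, S); the Python returns list(closureSet), consumed only through len(), so the
-- Set's element list is an exact port for every use made of it
def closureA (_R : List String) (F : List (List String × List String))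
    (S : List String) : List String :=
  closureLoop F (F.map (fun _ => true)) (PySem.Set.ofList S) 0

def candidate_keys (R : List String) (F : List (List String × List String)) : List (List String) :=
  let Rsort := PySem.List.sorted R (fun x => x) false
  let allSubSets :=
    (PySem.List.pyRange 1 ((Rsort.length : Int) + 1) 1).flatMap
      (fun r => combos Rsort r.toNat)
  allSubSets.foldl
    (fun candidateKeys S =>
      let Sset := PySem.Set.ofList S
      let Splus := closureA Rsort F S
      if Splus.length = Rsort.length then
        if candidateKeys.any (fun candidate => pyLtSet candidate Sset) then candidateKeys
        else candidateKeys ++ [Sset]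
      else candidateKeys)
    []

-- ===== PORT B =====

-- Source B's 'if b not in cl: cl.add(b); queue.append(b)'
def addNew (st : PySem.Set String × List String) (b : String) :
    PySem.Set String × List String :=
  if st.1.contains b then st else (PySem.Set.add st.1 b, st.2 ++ [b])

-- measure for bfs termination: total positive count mass
def posSum (cnt : List Int) : Nat := (cnt.map Int.toNat).sum

-- Source B's body of 'for i in occ.get(a, []): cnt[i] -= 1; if cnt[i] == 0: fire'.
-- The range guard only makes the recursion total: occ's indices always index cnt
-- (Python would raise IndexError on an out-of-range index).
def decStep (F : List (List String × List String))
    (st : List Int × PySem.Set String × List String) (i : Int) :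
    List Int × PySem.Set String × List String :=
  if 0 ≤ i ∧ i.toNat < st.1.length then
    if st.1.getD i.toNat 0 - 1 == 0 then
      (st.1.set i.toNat (st.1.getD i.toNat 0 - 1), (F.getD i.toNat ([], [])).2.foldl addNew st.2)
    else (st.1.set i.toNat (st.1.getD i.toNat 0 - 1), st.2)
  else st

theorem posSum_set_le (l : List Int) (i : Nat) (v : Int) (h : v ≤ l.getD i 0) :
    posSum (l.set i v) ≤ posSum l := by
  induction l generalizing i with
  | nil => simp [posSum]
  | cons a as ih =>
    cases i with
    | zero => simp only [List.getD_cons_zero] at h; simp [posSum]; omega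
    | succ m =>
      simp only [List.getD_cons_succ] at h
      have := ih m h
      simp [posSum] at this ⊢
      omega

theorem posSum_set_lt (l : List Int) (i : Nat) (v : Int) (hi : i < l.length)
    (h : v.toNat < (l.getD i 0).toNat) : posSum (l.set i v) < posSum l := by
  induction l generalizing i with
  | nil => simp at hi
  | cons a as ih =>
    cases i with
    | zero => simp only [List.getD_cons_zero] at h; simp [posSum]; omega
    | succ m =>
      simp only [List.getD_cons_succ] at h
      have := ih m (by simpa using hi) h
      simp [posSum] at this ⊢
      omega

theorem decStep_measure (F : List (List String × List String))
    (st : List Int × PySem.Set String × List String) (i : Int) :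
    posSum (decStep F st i).1 ≤ posSum st.1 ∧
      (posSum (decStep F st i).1 = posSum st.1 → (decStep F st i).2.2 = st.2.2) := by
  unfold decStep
  split
  · rename_i hg
    split
    · rename_i hv
      dsimp only
      have hlt : posSum (st.1.set i.toNat (st.1.getD i.toNat 0 - 1)) < posSum st.1 := by
        apply posSum_set_lt _ _ _ hg.2
        have : st.1.getD i.toNat 0 = 1 := by
          have := beq_iff_eq.mp hv; omega
        omega
      exact ⟨le_of_lt hlt, fun he => absurd he (by omega)⟩
    · dsimp only
      refine ⟨posSum_set_le _ _ _ (by omega), fun _ => rfl⟩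
  · exact ⟨le_rfl, fun _ => rfl⟩

theorem foldl_decStep_measure (F : List (List String × List String)) (L : List Int)
    (st : List Int × PySem.Set String × List String) :
    posSum (L.foldl (decStep F) st).1 ≤ posSum st.1 ∧
      (posSum (L.foldl (decStep F) st).1 = posSum st.1 →
        (L.foldl (decStep F) st).2.2 = st.2.2) := by
  induction L generalizing st with
  | nil => exact ⟨le_rfl, fun _ => rfl⟩
  | cons i L ih =>
    simp only [List.foldl_cons]
    rcases decStep_measure F st i with ⟨h1, h2⟩
    rcases ih (decStep F st i) with ⟨h3, h4⟩
    refine ⟨le_trans h3 h1, fun he => ?_⟩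
    have e1 : posSum (L.foldl (decStep F) (decStep F st i)).1 = posSum (decStep F st i).1 := by
      omega
    have e2 : posSum (decStep F st i).1 = posSum st.1 := by omega
    rw [h4 e1, h2 e2]

-- Source B's 'while queue:' loop (queue.pop() pops the LAST element)
def bfs (F : List (List String × List String)) (occ : PySem.Dict String (List Int))
    (cnt : List Int) (cl : PySem.Set String) (queue : List String) : PySem.Set String :=
  if h : queue = [] then cl
  else
    let a := queue.getLast h
    let st := (occ.getD a []).foldl (decStep F) (cnt, cl, queue.dropLast)
    bfs F occ st.1 st.2.1 st.2.2
termination_by (posSum cnt, queue.length)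
decreasing_by
  rcases foldl_decStep_measure F (PySem.Dict.getD occ (queue.getLast h) [])
      (cnt, cl, queue.dropLast) with ⟨h1, h2⟩
  by_cases heq : posSum ((PySem.Dict.getD occ (queue.getLast h) []).foldl (decStep F)
      (cnt, cl, queue.dropLast)).1 = posSum cnt
  · rw [h2 heq, heq]
    have hlen : queue.dropLast.length < queue.length := by
      have : queue.length ≠ 0 := fun hc => h (List.eq_nil_of_length_eq_zero hc)
      simp [List.length_dropLast]; omega
    exact Prod.Lex.right _ hlen
  · exact Prod.Lex.left _ _ (lt_of_le_of_ne h1 heq)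

-- Source B's _closure_size
def closureSizeB (F : List (List String × List String)) (S : List String) : Int :=
  let cnt := F.map (fun p => PySem.Set.len (PySem.Set.ofList p.1))
  let occ := (PySem.List.enumerate F).foldl
    (fun d q => (PySem.Set.ofList q.2.1).foldl
      (fun d a => PySem.Dict.modify d a [] (· ++ [q.1])) d)
    PySem.Dict.empty
  let st0 := S.foldl addNew (PySem.Set.empty, ([] : List String))
  let st1 := (cnt.zip F).foldl
    (fun st q => if q.1 == 0 then q.2.2.foldl addNew st else st) st0
  PySem.Set.len (bfs F occ cnt st1.1 st1.2)

-- Source B's _is_minimal (S[:i] + S[i+1:] = S.eraseIdx i, exact for i < |S|)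
def isMinimalB (F : List (List String × List String)) (S : List String) (n : Int) : Bool :=
  if S.length == 1 then true
  else (List.range S.length).all (fun i => !(closureSizeB F (S.eraseIdx i) == n))

def candidate_keys_alt (R : List String) (F : List (List String × List String)) :
    List (List String) :=
  let Rsort := PySem.List.sorted R (fun x => x) false
  let n : Int := Rsort.length
  (((PySem.List.pyRange 1 ((Rsort.length : Int) + 1) 1).flatMap
      (fun r => combos Rsort r.toNat)).filter
    (fun S => closureSizeB F S == n && isMinimalB F S n)).map PySem.Set.ofList

-- ===== PRECONDITION & SPEC =====
-- Pre_ excludes relations R listing the same attribute twice: there A enumerates the same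
-- subset several times and the multiplicity of the (identical) keys in its output is an
-- accidental corner on which B's (also duplicated) output may differ.
def Pre_candidate_keys (R : List String) (F : List (List String × List String)) : Prop :=
  R.Nodup
instance (R : List String) (F : List (List String × List String)) :
    Decidable (Pre_candidate_keys R F) := by unfold Pre_candidate_keys; infer_instance

def pvWitness_candidate_keys : List String × (List (List String × List String)) :=
  (["A", "B"], [(["A"], ["B"])])

def Spec_candidate_keys (R : List String) (F : List (List String × List String)) (out : List (List String)) : Prop := out = candidate_keys_alt R F
instance (R : List String) (F : List (List String × List String)) (out : List (List String)) : Decidable (Spec_candidate_keys R F out) := by unfold Spec_candidate_keys; infer_instance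

-- ===== CLAIM (what is proved, stated in full; the proofs are below) =====
def Claim_equal_candidate_keys : Prop := ∀ (R : List String) (F : List (List String × List String)), Dom_candidate_keys R F → Pre_candidate_keys R F → Spec_candidate_keys R F (candidate_keys R F)

-- ===== LEMMAS AND PROOFS =====

-- X is closed under every FD of F
def ClosedF (F : List (List String × List String)) (X : List String) : Prop :=
  ∀ p ∈ F, (∀ a ∈ p.1, a ∈ X) → ∀ a ∈ p.2, a ∈ X

-- ---------- generic helpers ----------

theorem getD_set_ne' {α : Type} (l : List α) (j i : Nat) (v d : α) (h : j ≠ i) :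
    (l.set j v).getD i d = l.getD i d := by
  simp [List.getD, List.getElem?_set_ne h]

theorem getD_set_self' {α : Type} (l : List α) (i : Nat) (v d : α) (h : i < l.length) :
    (l.set i v).getD i d = v := by
  simp [List.getD, List.getElem?_set_self h]

theorem mem_foldl_add_id (rhs : List String) (cs : PySem.Set String) (x : String) :
    x ∈ rhs.foldl PySem.Set.add cs ↔ x ∈ cs ∨ x ∈ rhs := by
  induction rhs generalizing cs with
  | nil => simp
  | cons b bs ih => simp [ih, PySem.Set.mem_add]; tauto

theorem nodup_foldl_add (rhs : List String) (cs : PySem.Set String) (h : cs.Nodup) :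
    (rhs.foldl PySem.Set.add cs).Nodup := by
  induction rhs generalizing cs with
  | nil => exact h
  | cons b bs ih => exact ih _ (PySem.Set.nodup_add cs b h)

theorem nodup_length_le (l₁ l₂ : List String) (h : l₁.Nodup) (hs : l₁ ⊆ l₂) :
    l₁.length ≤ l₂.length :=
  calc l₁.length = l₁.toFinset.card := by rw [List.toFinset_card_of_nodup h]
  _ ≤ l₂.toFinset.card := Finset.card_le_card (fun x hx => by
      simp only [List.mem_toFinset] at *; exact hs hx)
  _ ≤ l₂.length := l₂.toFinset_card_le

theorem nodup_subset_antisymm (l₁ l₂ : List String) (h1 : l₁.Nodup) (h2 : l₂.Nodup)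
    (hs : l₁ ⊆ l₂) (hl : l₂.length ≤ l₁.length) : l₂ ⊆ l₁ := by
  have e : l₁.toFinset = l₂.toFinset := by
    apply Finset.eq_of_subset_of_card_le
      (fun x hx => by simp only [List.mem_toFinset] at *; exact hs hx)
    rw [List.toFinset_card_of_nodup h1, List.toFinset_card_of_nodup h2]; exact hl
  intro x hx
  have : x ∈ l₁.toFinset := by rw [e]; simpa using hx
  simpa using this

theorem mem_eraseIdx_of_nodup (S : List String) (i : Nat) (hi : i < S.length)
    (h : S.Nodup) (y : String) : y ∈ S.eraseIdx i ↔ y ∈ S ∧ y ≠ S[i] := by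
  rw [List.mem_eraseIdx_iff_getElem]
  constructor
  · rintro ⟨j, hj, hne, rfl⟩
    refine ⟨List.getElem_mem hj, fun he => hne ?_⟩
    exact (List.Nodup.getElem_inj_iff h).mp he
  · rintro ⟨hy, hne⟩
    rcases List.getElem_of_mem hy with ⟨j, hj, rfl⟩
    exact ⟨j, hj, fun he => hne (by subst he; rfl), rfl⟩

-- ---------- A-side closure lemmas ----------

theorem closureLoop_subset (F : List (List String × List String)) (unused : List Bool)
    (cs : PySem.Set String) (fIdx : Nat) :
    ∀ x ∈ cs, x ∈ closureLoop F unused cs fIdx := by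
  fun_induction closureLoop with
  | case1 unused cs fIdx h h2 ih =>
    intro x hx
    exact ih x ((mem_foldl_add_id _ _ _).mpr (Or.inl hx))
  | case2 unused cs fIdx h h2 ih => exact ih
  | case3 unused cs fIdx h => intro x hx; exact hx

theorem closureLoop_sound (F : List (List String × List String)) (unused : List Bool)
    (cs : PySem.Set String) (fIdx : Nat) (X : List String) (hX : ClosedF F X) :
    (∀ x ∈ cs, x ∈ X) → ∀ x ∈ closureLoop F unused cs fIdx, x ∈ X := by
  fun_induction closureLoop with
  | case1 unused cs fIdx h h2 ih =>
    refine fun hcs => ih ?_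
    intro x hx
    rcases (mem_foldl_add_id _ _ _).mp hx with hx | hx
    · exact hcs x hx
    · have hsub : (PySem.Set.ofList (F[fIdx].1)).issubset cs = true := by
        cases hba : (PySem.Set.ofList (F[fIdx].1)).issubset cs with
        | true => rfl
        | false => rw [hba] at h2; simp at h2
      have hlhs : ∀ a ∈ F[fIdx].1, a ∈ X := by
        intro a ha
        exact hcs a ((PySem.Set.issubset_iff _ _).mp hsub a ((PySem.Set.mem_ofList _ _).mpr ha))
      exact hX (F[fIdx]) (List.getElem_mem h) hlhs x hx
  | case2 unused cs fIdx h h2 ih => exact ih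
  | case3 unused cs fIdx h => exact fun hcs x hx => hcs x hx

theorem map_true_getD (F : List (List String × List String)) (i : Nat) (h : i < F.length) :
    (F.map (fun _ => true)).getD i false = true := by
  rw [List.getD_eq_getElem _ _ (by simpa using h)]
  simp

theorem closureLoop_closed (F : List (List String × List String)) (unused : List Bool)
    (cs : PySem.Set String) (fIdx : Nat) :
    (∀ i, (hi : i < F.length) → unused.getD i false = false → ∀ a ∈ F[i].2, a ∈ cs) →
    (∀ i, i < fIdx → (hi : i < F.length) →
        unused.getD i false = false ∨ ¬ (∀ a ∈ F[i].1, a ∈ cs)) →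
    ClosedF F (closureLoop F unused cs fIdx) := by
  fun_induction closureLoop with
  | case1 unused cs fIdx h h2 ih =>
    intro hinv1 _hinv2
    refine ih ?_ (by omega)
    intro i hi hset a ha
    by_cases hif : i = fIdx
    · subst hif
      exact (mem_foldl_add_id _ _ _).mpr (Or.inr ha)
    · have : unused.getD i false = false := by
        rwa [getD_set_ne' _ _ _ _ _ (by omega)] at hset
      exact (mem_foldl_add_id _ _ _).mpr (Or.inl (hinv1 i hi this a ha))
  | case2 unused cs fIdx h h2 ih =>
    intro hinv1 hinv2
    refine ih hinv1 ?_
    intro i hi hiF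
    by_cases hif : i = fIdx
    · subst hif
      rcases hbu : unused.getD i false with _ | _
      · exact Or.inl rfl
      · right
        intro hall
        apply h2
        have hsub : (PySem.Set.ofList (F[i].1)).issubset cs = true :=
          (PySem.Set.issubset_iff _ _).mpr (fun x hx => hall x ((PySem.Set.mem_ofList _ _).mp hx))
        rw [hbu, hsub]
        rfl
    · exact hinv2 i (by omega) hiF
  | case3 unused cs fIdx h =>
    intro hinv1 hinv2
    intro p hp hlhs a ha
    rcases List.getElem_of_mem hp with ⟨i, hiF, rfl⟩
    rcases hinv2 i (by omega) hiF with hu | hn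
    · exact hinv1 i hiF hu a ha
    · exact absurd hlhs hn

theorem closureLoop_nodup (F : List (List String × List String)) (unused : List Bool)
    (cs : PySem.Set String) (fIdx : Nat) :
    cs.Nodup → (closureLoop F unused cs fIdx).Nodup := by
  fun_induction closureLoop with
  | case1 unused cs fIdx h h2 ih => exact fun hn => ih (nodup_foldl_add _ _ hn)
  | case2 unused cs fIdx h h2 ih => exact ih
  | case3 unused cs fIdx h => exact id

theorem closureA_closed (R : List String) (F : List (List String × List String))
    (S : List String) : ClosedF F (closureA R F S) := by
  unfold closureA
  apply closureLoop_closed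
  · intro i hi hfalse
    rw [map_true_getD F i hi] at hfalse
    exact absurd hfalse (by simp)
  · intro i h0 _
    exact absurd h0 (by omega)

theorem closureA_subset (R : List String) (F : List (List String × List String))
    (S : List String) : ∀ x ∈ S, x ∈ closureA R F S := by
  intro x hx
  exact closureLoop_subset F _ _ 0 x ((PySem.Set.mem_ofList _ _).mpr hx)

theorem closureA_sound (R : List String) (F : List (List String × List String))
    (S : List String) (X : List String) (hX : ClosedF F X) (hS : ∀ x ∈ S, x ∈ X) :
    ∀ x ∈ closureA R F S, x ∈ X := by
  refine closureLoop_sound F _ _ 0 X hX ?_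
  intro y hy
  exact hS y ((PySem.Set.mem_ofList _ _).mp hy)

theorem closureA_nodup (R : List String) (F : List (List String × List String))
    (S : List String) : (closureA R F S).Nodup :=
  closureLoop_nodup F _ _ 0 (PySem.Set.nodup_ofList S)

-- ---------- B-side closure: correctness of the counter propagation ----------

def lhsE (F : List (List String × List String)) (i : Nat) : PySem.Set String :=
  PySem.Set.ofList (F.getD i ([], [])).1

def rhsE (F : List (List String × List String)) (i : Nat) : List String :=
  (F.getD i ([], [])).2

def undoneB (cl : PySem.Set String) (queue : List String) (a : String) : Bool :=
  !(cl.contains a && !queue.contains a)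

-- cl element set after a foldl addNew, plus all the structural facts preserved by it
theorem addNew_eq (st : PySem.Set String × List String) (b : String) :
    addNew st b = if b ∈ st.1 then st else (st.1 ++ [b], st.2 ++ [b]) := by
  unfold addNew
  by_cases h : b ∈ st.1
  · simp [h]
  · simp [h]

theorem foldl_addNew_props (L : List String) (st : PySem.Set String × List String)
    (h1 : st.1.Nodup) (h2 : st.2.Nodup) (h3 : ∀ a ∈ st.2, a ∈ st.1) :
    (L.foldl addNew st).1.Nodup ∧ (L.foldl addNew st).2.Nodup ∧
    (∀ a ∈ (L.foldl addNew st).2, a ∈ (L.foldl addNew st).1) ∧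
    (∀ x, x ∈ (L.foldl addNew st).1 ↔ x ∈ st.1 ∨ x ∈ L) ∧
    (∀ x, (x ∈ (L.foldl addNew st).1 ∧ x ∉ (L.foldl addNew st).2) ↔
      (x ∈ st.1 ∧ x ∉ st.2)) := by
  induction L generalizing st with
  | nil => exact ⟨h1, h2, h3, fun x => by simp, fun x => by simp⟩
  | cons b L ih =>
    simp only [List.foldl_cons]
    rw [addNew_eq]
    by_cases hb : b ∈ st.1
    · rw [if_pos hb]
      rcases ih st h1 h2 h3 with ⟨g1, g2, g3, g4, g5⟩
      refine ⟨g1, g2, g3, fun x => ?_, g5⟩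
      rw [g4]
      constructor
      · rintro (h | h)
        · exact Or.inl h
        · exact Or.inr (List.mem_cons_of_mem _ h)
      · rintro (h | h)
        · exact Or.inl h
        · rcases List.mem_cons.mp h with rfl | h
          · exact Or.inl hb
          · exact Or.inr h
    · rw [if_neg hb]
      have h1' : (st.1 ++ [b]).Nodup := by
        refine List.Nodup.append h1 (List.nodup_singleton b) ?_
        intro a ha hb2
        rw [List.mem_singleton] at hb2; subst hb2; exact hb ha
      have h2' : (st.2 ++ [b]).Nodup := by
        refine List.Nodup.append h2 (List.nodup_singleton b) ?_
        intro a ha hb2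
        rw [List.mem_singleton] at hb2; subst hb2; exact hb (h3 a ha)
      have h3' : ∀ a ∈ st.2 ++ [b], a ∈ st.1 ++ [b] := by
        intro a ha
        rcases List.mem_append.mp ha with h | h
        · exact List.mem_append.mpr (Or.inl (h3 a h))
        · exact List.mem_append.mpr (Or.inr h)
      rcases ih (st.1 ++ [b], st.2 ++ [b]) h1' h2' h3' with ⟨g1, g2, g3, g4, g5⟩
      refine ⟨g1, g2, g3, fun x => ?_, fun x => ?_⟩
      · rw [g4]; simp; tauto
      · rw [g5]
        simp only [List.mem_append, List.mem_singleton]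
        constructor
        · rintro ⟨ha, hb2⟩
          rcases ha with ha | rfl
          · exact ⟨ha, fun h => hb2 (Or.inl h)⟩
          · exact absurd (Or.inr rfl) hb2
        · rintro ⟨ha, hb2⟩
          refine ⟨Or.inl ha, ?_⟩
          rintro (h | rfl)
          · exact hb2 h
          · exact hb ha


-- the occ dictionary: occ[a] lists exactly the rules whose LHS contains a, each once
theorem foldl_flatMap_eq {α β γ : Type} (xs : List α) (g : α → List β) (f : γ → β → γ)
    (init : γ) :
    (xs.flatMap g).foldl f init = xs.foldl (fun a x => (g x).foldl f a) init := by
  induction xs generalizing init with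
  | nil => rfl
  | cons x xs ih => simp [List.flatMap_cons, List.foldl_append, ih]

theorem occ_eq_pairs (F : List (List String × List String)) :
    ((PySem.List.enumerate F).foldl
        (fun d q => (PySem.Set.ofList q.2.1).foldl
          (fun d a => PySem.Dict.modify d a [] (· ++ [q.1])) d)
        PySem.Dict.empty) =
    ((PySem.List.enumerate F).flatMap
        (fun q => (PySem.Set.ofList q.2.1).map (fun a => (a, q.1)))).foldl
      (fun d p => PySem.Dict.modify d p.1 [] (· ++ [p.2])) PySem.Dict.empty := by
  rw [foldl_flatMap_eq]
  congr 1
  funext d q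
  rw [List.foldl_map]

theorem filter_fst_map_pair (l : List String) (hl : l.Nodup) (a : String) (i : Int) :
    (((l.map (fun x => (x, i))).filter (fun p => p.1 == a)).map (fun p => p.2)) =
      if l.contains a then [i] else [] := by
  induction l with
  | nil => rfl
  | cons x xs ih =>
    rcases List.nodup_cons.mp hl with ⟨hx, hxs⟩
    simp only [List.map_cons, List.filter_cons]
    by_cases he : x = a
    · subst he
      have h0 := ih hxs
      have hxc : (xs.contains x) = false := by rw [List.contains_eq_mem]; simpa using hx
      rw [hxc, if_neg (by simp)] at h0
      simp only [beq_self_eq_true, if_true, List.map_cons, h0]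
      rw [List.contains_cons]
      simp
    · have hne : ((x == a)) = false := by simpa using he
      rw [hne]
      simp only [Bool.false_eq_true, if_false]
      rw [ih hxs, List.contains_cons]
      have : ((a == x)) = false := by simp [Ne.symm he]
      rw [this]
      simp

theorem occ_getD_eq (F : List (List String × List String)) (a : String) :
    (((PySem.List.enumerate F).foldl
        (fun d q => (PySem.Set.ofList q.2.1).foldl
          (fun d a => PySem.Dict.modify d a [] (· ++ [q.1])) d)
        PySem.Dict.empty).getD a []) =
    (((PySem.List.enumerate F).filter
        (fun q => (PySem.Set.ofList q.2.1).contains a)).map (fun q => q.1)) := by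
  rw [occ_eq_pairs, PySem.Dict.getD_foldl_modify_append]
  have hemp : (PySem.Dict.empty : PySem.Dict String (List Int)).getD a [] = [] := rfl
  rw [hemp, List.nil_append]
  induction PySem.List.enumerate F with
  | nil => rfl
  | cons q L ih =>
    rw [List.flatMap_cons, List.filter_append, List.map_append, ih, List.filter_cons]
    rw [filter_fst_map_pair _ (PySem.Set.nodup_ofList _) a q.1]
    by_cases hc : a ∈ q.2.1
    · simp [hc]
    · simp [hc]

theorem occ_getD_spec (F : List (List String × List String)) (a : String) :
    (∀ j : Int, j ∈ (((PySem.List.enumerate F).foldl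
        (fun d q => (PySem.Set.ofList q.2.1).foldl
          (fun d a => PySem.Dict.modify d a [] (· ++ [q.1])) d)
        PySem.Dict.empty).getD a []) ↔
      ∃ k : Nat, k < F.length ∧ j = (k : Int) ∧ a ∈ lhsE F k) ∧
    (((PySem.List.enumerate F).foldl
        (fun d q => (PySem.Set.ofList q.2.1).foldl
          (fun d a => PySem.Dict.modify d a [] (· ++ [q.1])) d)
        PySem.Dict.empty).getD a []).Nodup := by
  rw [occ_getD_eq]
  constructor
  · intro j
    constructor
    · intro hj
      rcases List.mem_map.mp hj with ⟨q, hq, rfl⟩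
      rcases List.mem_filter.mp hq with ⟨hqe, hqc⟩
      rcases (PySem.List.mem_enumerate_iff _ _ _).mp hqe with ⟨k, hk, rfl⟩
      refine ⟨k, hk, by simp, ?_⟩
      have hmem : a ∈ PySem.Set.ofList F[k].1 := by
        have : (PySem.Set.ofList F[k].1).contains a = true := hqc
        simpa using this
      simpa [lhsE, List.getD, List.getElem?_eq_getElem hk] using hmem
    · rintro ⟨k, hk, rfl, hmem⟩
      refine List.mem_map.mpr ⟨((k : Int), F[k]), List.mem_filter.mpr ⟨?_, ?_⟩, rfl⟩
      · exact (PySem.List.mem_enumerate_iff _ _ _).mpr ⟨k, hk, by simp⟩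
      · show (PySem.Set.ofList F[k].1).contains a = true
        simp only [lhsE, List.getD, List.getElem?_eq_getElem hk, Option.getD_some] at hmem
        simpa using hmem
  · have hp : ((PySem.List.enumerate F).filter
        (fun q => (PySem.Set.ofList q.2.1).contains a)).Pairwise (fun p q => p.1 < q.1) :=
      (PySem.List.pairwise_lt_enumerate F 0).filter _
    have := (List.pairwise_map.mpr (hp.imp (fun h => ne_of_lt h)))
    exact this

-- countP changes by exactly one when a single element's status flips (nodup list)
theorem countP_flip (l : List String) (hl : l.Nodup) (p q : String → Bool) (a : String)
    (hpq : ∀ x, x ≠ a → p x = q x) (hpa : p a = true) (hqa : q a = false) :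
    l.countP p = l.countP q + (if a ∈ l then 1 else 0) := by
  induction l with
  | nil => simp
  | cons x xs ih =>
    rcases List.nodup_cons.mp hl with ⟨hx, hxs⟩
    simp only [List.countP_cons]
    by_cases he : x = a
    · subst he
      have h0 := ih hxs
      rw [if_neg hx] at h0
      rw [hpa, hqa, if_pos List.mem_cons_self]
      rw [if_pos rfl, if_neg (by simp)]
      omega
    · rw [hpq x he]
      have := ih hxs
      by_cases hm : a ∈ xs
      · rw [if_pos hm] at this
        rw [if_pos (List.mem_cons_of_mem _ hm), this]
        omega
      · rw [if_neg hm] at this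
        have hnm : a ∉ x :: xs := by
          intro hmem
          rcases List.mem_cons.mp hmem with h | h
          · exact he h.symm
          · exact hm h
        rw [if_neg hnm, this]
        omega

-- invariant pack for the interior of Source B's while loop
def InvB (F : List (List String × List String))
    (st : List Int × PySem.Set String × List String) : Prop :=
  st.2.1.Nodup ∧ st.2.2.Nodup ∧ (∀ a ∈ st.2.2, a ∈ st.2.1) ∧ st.1.length = F.length ∧
  (∀ i, i < F.length →
    st.1.getD i 0 = ((lhsE F i).countP (undoneB st.2.1 st.2.2) : Int)) ∧
  (∀ i, i < F.length → st.1.getD i 0 = 0 → ∀ b ∈ rhsE F i, b ∈ st.2.1)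

-- done-status as a proposition
theorem undoneB_eq (cl : PySem.Set String) (q : List String) (x : String) :
    undoneB cl q x = !decide (x ∈ cl ∧ x ∉ q) := by
  simp [undoneB, List.contains_eq_mem]

theorem undoneB_congr (cl cl' : PySem.Set String) (q q' : List String)
    (h : ∀ x, (x ∈ cl' ∧ x ∉ q') ↔ (x ∈ cl ∧ x ∉ q)) :
    ∀ x, undoneB cl' q' x = undoneB cl q x := by
  intro x
  rw [undoneB_eq, undoneB_eq]
  rcases Decidable.em (x ∈ cl ∧ x ∉ q) with hd | hd
  · rw [decide_eq_true hd, decide_eq_true ((h x).mpr hd)]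
  · rw [decide_eq_false hd, decide_eq_false (fun hc => hd ((h x).mp hc))]

-- countP undone = 0 means the whole LHS is settled inside cl
theorem countP_zero_done (l : List String) (cl : PySem.Set String) (q : List String)
    (h : l.countP (undoneB cl q) = 0) : ∀ x ∈ l, x ∈ cl ∧ x ∉ q := by
  intro x hx
  have := List.countP_eq_zero.mp h x hx
  rw [undoneB_eq] at this
  simpa using this

-- one pass of 'for i in occ.get(a, [])' restores the invariant after popping a
theorem foldl_decStep_inv (F : List (List String × List String)) (X : List String)
    (hX : ClosedF F X) (a : String) :
    ∀ (L : List Int) (st : List Int × PySem.Set String × List String),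
    L.Nodup → (∀ j ∈ L, ∃ k : Nat, k < F.length ∧ j = (k : Int) ∧ a ∈ lhsE F k) →
    st.2.1.Nodup → st.2.2.Nodup → (∀ b ∈ st.2.2, b ∈ st.2.1) →
    st.1.length = F.length →
    (∀ i, i < F.length → st.1.getD i 0 = ((lhsE F i).countP (undoneB st.2.1 st.2.2) : Int)
      + (if (i : Int) ∈ L then 1 else 0)) →
    (∀ i, i < F.length → st.1.getD i 0 = 0 → ∀ b ∈ rhsE F i, b ∈ st.2.1) →
    (a ∈ st.2.1) → (a ∉ st.2.2) →
    (∀ x ∈ st.2.1, x ∈ X) →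
    InvB F (L.foldl (decStep F) st) ∧
    (∀ x ∈ st.2.1, x ∈ (L.foldl (decStep F) st).2.1) ∧
    (∀ x ∈ (L.foldl (decStep F) st).2.1, x ∈ X) ∧
    (a ∈ (L.foldl (decStep F) st).2.1) ∧ (a ∉ (L.foldl (decStep F) st).2.2) := by
  intro L
  induction L with
  | nil =>
    intro st _ _ h1 h2 h3 hlen hmid hfired ha hanq hsound
    refine ⟨⟨h1, h2, h3, hlen, ?_, hfired⟩, fun x hx => hx, hsound, ha, hanq⟩
    intro i hi
    have := hmid i hi
    simpa using this
  | cons j L ih =>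
    intro st hnd hmem h1 h2 h3 hlen hmid hfired ha hanq hsound
    rcases List.nodup_cons.mp hnd with ⟨hjL, hndL⟩
    rcases hmem j List.mem_cons_self with ⟨k, hk, rfl, hak⟩
    obtain ⟨cnt, cl, qu⟩ := st
    dsimp only at h1 h2 h3 hlen hmid hfired ha hanq hsound ⊢
    simp only [List.foldl_cons]
    have hguard : 0 ≤ (k : Int) ∧ ((k : Int)).toNat < cnt.length :=
      ⟨Int.natCast_nonneg k, by simp only [Int.toNat_natCast]; omega⟩
    have hv : cnt.getD k 0 = ((lhsE F k).countP (undoneB cl qu) : Int) + 1 := by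
      have := hmid k hk
      rw [if_pos List.mem_cons_self] at this
      exact this
    have hkL : (k : Int) ∉ L := hjL
    have hdec : decStep F (cnt, cl, qu) (k : Int) =
        (if cnt.getD k 0 - 1 == 0 then
          (cnt.set k (cnt.getD k 0 - 1), (F.getD k ([], [])).2.foldl addNew (cl, qu))
        else (cnt.set k (cnt.getD k 0 - 1), (cl, qu))) := by
      unfold decStep
      rw [if_pos hguard]
      simp only [Int.toNat_natCast]
    by_cases hc0 : (lhsE F k).countP (undoneB cl qu) = 0
    · -- the rule fires: its whole LHS is settled, add the RHS
      have hveq : cnt.getD k 0 - 1 = 0 := by rw [hv, hc0]; simp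
      rw [hdec, if_pos (by simp only [beq_iff_eq]; exact hveq)]
      have hlhsX : ∀ x ∈ (F.getD k ([], [])).1, x ∈ X := by
        intro x hx
        have hxl : x ∈ lhsE F k := (PySem.Set.mem_ofList _ _).mpr hx
        exact hsound x (countP_zero_done _ _ _ hc0 x hxl).1
      have hFk : F.getD k ([], []) ∈ F := by
        rw [List.getD_eq_getElem _ _ hk]
        exact List.getElem_mem hk
      have hrhsX : ∀ b ∈ (F.getD k ([], [])).2, b ∈ X := hX _ hFk hlhsX
      rcases foldl_addNew_props (F.getD k ([], [])).2 (cl, qu) h1 h2 h3 with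
        ⟨g1, g2, g3, g4, g5⟩
      set st2 := (F.getD k ([], [])).2.foldl addNew (cl, qu) with hst2
      have hdone : ∀ x, undoneB st2.1 st2.2 x = undoneB cl qu x := undoneB_congr _ _ _ _ g5
      have hcntP : ∀ l : List String, l.countP (undoneB st2.1 st2.2) =
          l.countP (undoneB cl qu) := fun l => List.countP_congr (fun x _ => by rw [hdone x])
      have h2a : a ∈ st2.1 := ((g5 a).mpr ⟨ha, hanq⟩).1
      have h2anq : a ∉ st2.2 := ((g5 a).mpr ⟨ha, hanq⟩).2
      have hlen2 : (cnt.set k (cnt.getD k 0 - 1)).length = F.length := by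
        simpa using hlen
      have hmid2 : ∀ i, i < F.length →
          (cnt.set k (cnt.getD k 0 - 1)).getD i 0 =
            ((lhsE F i).countP (undoneB st2.1 st2.2) : Int) +
              (if (i : Int) ∈ L then 1 else 0) := by
        intro i hi
        rw [hcntP]
        by_cases hik : i = k
        · subst hik
          rw [getD_set_self' _ _ _ _ (by omega), if_neg (by exact_mod_cast hkL), hv, hc0]
          simp
        · rw [getD_set_ne' _ _ _ _ _ (fun h => hik h.symm)]
          have := hmid i hi
          rw [this]
          congr 1
          by_cases hmm : (i : Int) ∈ L
          · rw [if_pos (List.mem_cons_of_mem _ hmm), if_pos hmm]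
          · rw [if_neg ?_, if_neg hmm]
            intro hcc
            rcases List.mem_cons.mp hcc with hx | hx
            · exact hik (by exact_mod_cast hx)
            · exact hmm hx
      have hfired2 : ∀ i, i < F.length →
          (cnt.set k (cnt.getD k 0 - 1)).getD i 0 = 0 → ∀ b ∈ rhsE F i, b ∈ st2.1 := by
        intro i hi hz b hb
        by_cases hik : i = k
        · subst hik
          exact (g4 b).mpr (Or.inr hb)
        · rw [getD_set_ne' _ _ _ _ _ (fun h => hik h.symm)] at hz
          exact (g4 b).mpr (Or.inl (hfired i hi hz b hb))
      have hsound2 : ∀ x ∈ st2.1, x ∈ X := by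
        intro x hx
        rcases (g4 x).mp hx with h | h
        · exact hsound x h
        · exact hrhsX x h
      rcases ih (cnt.set k (cnt.getD k 0 - 1), st2.1, st2.2) hndL
        (fun j hj => hmem j (List.mem_cons_of_mem _ hj)) g1 g2 g3 hlen2 hmid2 hfired2
        h2a h2anq hsound2 with ⟨c1, c2, c3, c4, c5⟩
      exact ⟨c1, fun x hx => c2 x ((g4 x).mpr (Or.inl hx)), c3, c4, c5⟩
    · have hvne : ¬ (cnt.getD k 0 - 1 == 0) = true := by
        simp only [beq_iff_eq]
        intro hcon
        rw [hv] at hcon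
        omega
      rw [hdec, if_neg hvne]
      apply ih _ hndL (fun j hj => hmem j (List.mem_cons_of_mem _ hj)) h1 h2 h3
        (by simpa using hlen) ?_ ?_ ha hanq hsound
      · intro i hi
        dsimp only
        by_cases hik : i = k
        · subst hik
          rw [getD_set_self' _ _ _ _ (by omega), if_neg (by exact_mod_cast hkL)]
          rw [hv]
          omega
        · rw [getD_set_ne' _ _ _ _ _ (fun h => hik h.symm)]
          have := hmid i hi
          rw [this]
          have hcast : ((i : Int) ∈ ((k : Int) :: L)) ↔ ((i : Int) ∈ L) := by
            constructor
            · intro hm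
              rcases List.mem_cons.mp hm with hx | hx
              · exact absurd (by exact_mod_cast hx) hik
              · exact hx
            · exact List.mem_cons_of_mem _
          by_cases hmm : (i : Int) ∈ L
          · rw [if_pos (hcast.mpr hmm), if_pos hmm]
          · rw [if_neg (fun hcc => hmm (hcast.mp hcc)), if_neg hmm]
      · intro i hi hz
        dsimp only at hz ⊢
        by_cases hik : i = k
        · subst hik
          rw [getD_set_self' _ _ _ _ (by omega)] at hz
          exfalso
          rw [hv] at hz
          omega
        · rw [getD_set_ne' _ _ _ _ _ (fun h => hik h.symm)] at hz
          exact hfired i hi hz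

-- the while loop: from an invariant state it returns the closure
theorem bfs_inv (F : List (List String × List String)) (occ : PySem.Dict String (List Int))
    (hocc : ∀ a, (∀ j : Int, j ∈ occ.getD a [] ↔
        ∃ k : Nat, k < F.length ∧ j = (k : Int) ∧ a ∈ lhsE F k) ∧ (occ.getD a []).Nodup)
    (X : List String) (hX : ClosedF F X) :
    ∀ (cnt : List Int) (cl : PySem.Set String) (queue : List String),
    (∀ x ∈ cl, x ∈ X) → InvB F (cnt, cl, queue) →
    (∀ x ∈ cl, x ∈ bfs F occ cnt cl queue) ∧
    (bfs F occ cnt cl queue).Nodup ∧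
    ClosedF F (bfs F occ cnt cl queue) ∧
    (∀ x ∈ bfs F occ cnt cl queue, x ∈ X) := by
  intro cnt cl queue
  fun_induction bfs F occ cnt cl queue with
  | case1 cnt cl =>
    intro hclX hinv
    obtain ⟨h1, h2, h3, hlen, hmid, hfired⟩ := hinv
    dsimp only at h1 h2 h3 hlen hmid hfired
    refine ⟨fun x hx => hx, h1, ?_, hclX⟩
    intro p hp hlhs b hb
    rcases List.getElem_of_mem hp with ⟨i, hi, rfl⟩
    have hz : cnt.getD i 0 = 0 := by
      rw [hmid i hi]
      have : (lhsE F i).countP (undoneB cl []) = 0 := by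
        apply List.countP_eq_zero.mpr
        intro x hx
        have hxcl : x ∈ cl := by
          apply hlhs
          have : lhsE F i = PySem.Set.ofList F[i].1 := by
            rw [lhsE, List.getD_eq_getElem _ _ hi]
          rw [this] at hx
          exact (PySem.Set.mem_ofList _ _).mp hx
        rw [undoneB_eq]
        simp [hxcl]
      rw [this]
      simp
    have := hfired i hi hz
    apply this
    rw [rhsE, List.getD_eq_getElem _ _ hi]
    exact hb
  | case2 cnt cl queue h a st ih =>
    intro hclX hinv
    obtain ⟨h1, h2, h3, hlen, hmid, hfired⟩ := hinv
    dsimp only at h1 h2 h3 hlen hmid hfired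
    have hqe : queue.dropLast ++ [a] = queue := List.dropLast_append_getLast h
    have ha : a ∈ cl := h3 a (List.getLast_mem h)
    have hanq : a ∉ queue.dropLast := by
      have hnd := h2
      rw [← hqe] at hnd
      intro hc
      rcases List.nodup_append.mp hnd with ⟨_, _, hdisj⟩
      exact hdisj a hc a (List.mem_singleton.mpr rfl) rfl
    have hqd2 : queue.dropLast.Nodup := by
      have := h2
      rw [← hqe] at this
      exact (List.nodup_append.mp this).1
    have hqd3 : ∀ b ∈ queue.dropLast, b ∈ cl :=
      fun b hb => h3 b (by rw [← hqe]; exact List.mem_append.mpr (Or.inl hb))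
    have hmid2 : ∀ i, i < F.length →
        cnt.getD i 0 = ((lhsE F i).countP (undoneB cl queue.dropLast) : Int) +
          (if (i : Int) ∈ occ.getD a [] then 1 else 0) := by
      intro i hi
      rw [hmid i hi]
      have hflip : (lhsE F i).countP (undoneB cl queue) =
          (lhsE F i).countP (undoneB cl queue.dropLast) +
            (if a ∈ lhsE F i then 1 else 0) := by
        apply countP_flip _ (PySem.Set.nodup_ofList _) _ _ a
        · intro x hx
          rw [undoneB_eq, undoneB_eq]
          have : x ∈ queue ↔ x ∈ queue.dropLast := by
            rw [← hqe]
            simp [hx]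
          rcases Decidable.em (x ∈ cl ∧ x ∉ queue) with hd | hd
          · rw [decide_eq_true hd, decide_eq_true ⟨hd.1, fun hc => hd.2 (this.mpr hc)⟩]
          · rw [decide_eq_false hd, decide_eq_false
              (fun hc => hd ⟨hc.1, fun hq => hc.2 (this.mp hq)⟩)]
        · rw [undoneB_eq]
          have haq : a ∈ queue := List.getLast_mem h
          simp [haq]
        · rw [undoneB_eq]
          simp [ha, hanq]
      rw [hflip]
      have : ((i : Int) ∈ occ.getD a []) ↔ a ∈ lhsE F i := by
        rw [(hocc a).1]
        constructor
        · rintro ⟨k, hk, hke, hm⟩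
          have : i = k := by exact_mod_cast hke
          subst this
          exact hm
        · intro hm
          exact ⟨i, hi, rfl, hm⟩
      by_cases hmm : a ∈ lhsE F i
      · rw [if_pos hmm, if_pos (this.mpr hmm)]
        push_cast
        ring
      · rw [if_neg hmm, if_neg (fun hc => hmm (this.mp hc))]
        push_cast
        ring
    rcases foldl_decStep_inv F X hX a (occ.getD a []) (cnt, cl, queue.dropLast)
      (hocc a).2 (fun j hj => ((hocc a).1 j).mp hj) h1 hqd2 hqd3 hlen hmid2
      (fun i hi hz => hfired i hi hz) ha hanq hclX with ⟨c1, c2, c3, c4, c5⟩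
    rcases ih (c3) (by
      obtain ⟨d1, d2, d3, d4, d5, d6⟩ := c1
      exact ⟨d1, d2, d3, d4, d5, d6⟩) with ⟨e1, e2, e3, e4⟩
    exact ⟨fun x hx => e1 x (c2 x hx), e2, e3, e4⟩

-- after the two seeding loops of _closure_size the invariant holds
theorem condFold_props (L : List (Int × (List String × List String)))
    (st : PySem.Set String × List String) (h1 : st.1.Nodup) (h2 : st.2.Nodup)
    (h3 : ∀ a ∈ st.2, a ∈ st.1) :
    (L.foldl (fun st q => if q.1 == 0 then q.2.2.foldl addNew st else st) st).1.Nodup ∧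
    (L.foldl (fun st q => if q.1 == 0 then q.2.2.foldl addNew st else st) st).2.Nodup ∧
    (∀ a ∈ (L.foldl (fun st q => if q.1 == 0 then q.2.2.foldl addNew st else st) st).2,
      a ∈ (L.foldl (fun st q => if q.1 == 0 then q.2.2.foldl addNew st else st) st).1) ∧
    (∀ x, x ∈ (L.foldl (fun st q => if q.1 == 0 then q.2.2.foldl addNew st else st) st).1 ↔
      x ∈ st.1 ∨ ∃ q ∈ L, q.1 = 0 ∧ x ∈ q.2.2) ∧
    (∀ x, (x ∈ (L.foldl (fun st q => if q.1 == 0 then q.2.2.foldl addNew st else st) st).1 ∧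
        x ∉ (L.foldl (fun st q => if q.1 == 0 then q.2.2.foldl addNew st else st) st).2) ↔
      (x ∈ st.1 ∧ x ∉ st.2)) := by
  induction L generalizing st with
  | nil => exact ⟨h1, h2, h3, fun x => by simp, fun x => by simp⟩
  | cons q L ih =>
    simp only [List.foldl_cons]
    by_cases hq : q.1 = 0
    · rw [if_pos (by simpa using hq)]
      rcases foldl_addNew_props q.2.2 st h1 h2 h3 with ⟨g1, g2, g3, g4, g5⟩
      rcases ih (q.2.2.foldl addNew st) g1 g2 g3 with ⟨k1, k2, k3, k4, k5⟩
      refine ⟨k1, k2, k3, fun x => ?_, fun x => (k5 x).trans (g5 x)⟩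
      rw [k4, g4]
      constructor
      · rintro ((hx | hx) | hx)
        · exact Or.inl hx
        · exact Or.inr ⟨q, List.mem_cons_self, hq, hx⟩
        · rcases hx with ⟨p, hp, hp0, hpx⟩
          exact Or.inr ⟨p, List.mem_cons_of_mem _ hp, hp0, hpx⟩
      · rintro (hx | ⟨p, hp, hp0, hpx⟩)
        · exact Or.inl (Or.inl hx)
        · rcases List.mem_cons.mp hp with rfl | hp
          · exact Or.inl (Or.inr hpx)
          · exact Or.inr ⟨p, hp, hp0, hpx⟩
    · rw [if_neg (by simpa using hq)]
      rcases ih st h1 h2 h3 with ⟨k1, k2, k3, k4, k5⟩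
      refine ⟨k1, k2, k3, fun x => ?_, k5⟩
      rw [k4]
      constructor
      · rintro (hx | ⟨p, hp, hp0, hpx⟩)
        · exact Or.inl hx
        · exact Or.inr ⟨p, List.mem_cons_of_mem _ hp, hp0, hpx⟩
      · rintro (hx | ⟨p, hp, hp0, hpx⟩)
        · exact Or.inl hx
        · rcases List.mem_cons.mp hp with rfl | hp
          · exact absurd hp0 hq
          · exact Or.inr ⟨p, hp, hp0, hpx⟩

theorem closureB_props (F : List (List String × List String)) (S : List String)
    (X : List String) (hX : ClosedF F X) (hS : ∀ x ∈ S, x ∈ X) :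
    ∃ res : PySem.Set String,
      closureSizeB F S = PySem.Set.len res ∧ res.Nodup ∧ (∀ x ∈ S, x ∈ res) ∧
      ClosedF F res ∧ (∀ x ∈ res, x ∈ X) := by
  refine ⟨_, rfl, ?_⟩
  set cnt := F.map (fun p => PySem.Set.len (PySem.Set.ofList p.1)) with hcnt
  have hcntlen : cnt.length = F.length := by simp [hcnt]
  have hcntget : ∀ i, i < F.length → cnt.getD i 0 = (((lhsE F i)).length : Int) := by
    intro i hi
    rw [hcnt, List.getD_eq_getElem _ _ (by simpa using hi), List.getElem_map]
    have he : lhsE F i = PySem.Set.ofList F[i].1 := by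
      rw [lhsE, List.getD_eq_getElem _ _ hi]
    rw [he]
    rfl
  rcases foldl_addNew_props S (PySem.Set.empty, ([] : List String))
      List.nodup_nil List.nodup_nil (by simp) with ⟨g1, g2, g3, g4, g5⟩
  rcases condFold_props (cnt.zip F) _ g1 g2 g3 with ⟨k1, k2, k3, k4, k5⟩
  set st0 := S.foldl addNew (PySem.Set.empty, ([] : List String)) with hst0
  set st1 := (cnt.zip F).foldl
    (fun st q => if q.1 == 0 then q.2.2.foldl addNew st else st) st0 with hst1
  have hmem1 : ∀ x, x ∈ st1.1 ↔ x ∈ S ∨ ∃ q ∈ cnt.zip F, q.1 = 0 ∧ x ∈ q.2.2 := by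
    intro x
    rw [k4 x]
    constructor
    · rintro (hx | hx)
      · exact Or.inl (by simpa using (g4 x).mp hx)
      · exact Or.inr hx
    · rintro (hx | hx)
      · exact Or.inl ((g4 x).mpr (Or.inr hx))
      · exact Or.inr hx
  have hzip : ∀ q ∈ cnt.zip F, q.1 = 0 → (∀ a ∈ q.2.1, False) ∧ q.2 ∈ F := by
    intro q hq hq0
    rcases List.getElem_of_mem hq with ⟨i, hilen, rfl⟩
    have hiF : i < F.length := by
      have := hilen
      simp [List.length_zip, hcntlen] at this
      omega
    rw [List.getElem_zip] at hq0 ⊢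
    refine ⟨?_, List.getElem_mem hiF⟩
    intro a hab
    have : cnt.getD i 0 = 0 := by
      rw [List.getD_eq_getElem _ _ (by omega)]
      exact hq0
    rw [hcntget i hiF] at this
    have hlen0 : (lhsE F i).length = 0 := by exact_mod_cast this
    have : a ∈ lhsE F i := by
      rw [lhsE, List.getD_eq_getElem _ _ hiF]
      exact (PySem.Set.mem_ofList _ _).mpr hab
    rw [List.length_eq_zero_iff.mp hlen0] at this
    exact absurd this (List.not_mem_nil)
  have hsound1 : ∀ x ∈ st1.1, x ∈ X := by
    intro x hx
    rcases (hmem1 x).mp hx with hx | ⟨q, hq, hq0, hqx⟩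
    · exact hS x hx
    · rcases hzip q hq hq0 with ⟨hempty, hqF⟩
      exact hX q.2 hqF (fun a ha => absurd ha (fun hc => hempty a hc)) x hqx
  have hinv : InvB F (cnt, st1.1, st1.2) := by
    refine ⟨k1, k2, k3, hcntlen, ?_, ?_⟩
    · intro i hi
      dsimp only
      rw [hcntget i hi]
      congr 1
      have hall : ∀ x ∈ lhsE F i, undoneB st1.1 st1.2 x = true := by
        intro x _
        rw [undoneB_eq]
        have := (k5 x).trans (g5 x)
        have hnd : ¬ (x ∈ st1.1 ∧ x ∉ st1.2) := by
          rw [this]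
          simp
        simp only [hnd, decide_eq_false hnd]
        rfl
      rw [List.countP_eq_length.mpr hall]
    · intro i hi hz b hb
      have hq : (cnt.getD i 0, F[i]) ∈ cnt.zip F := by
        have hil : i < (cnt.zip F).length := by simp [List.length_zip, hcntlen, hi]
        have : (cnt.zip F)[i] = (cnt[i], F[i]) := List.getElem_zip
        rw [← List.getD_eq_getElem cnt 0 (by omega)] at this
        exact this ▸ List.getElem_mem hil
      apply (hmem1 b).mpr
      refine Or.inr ⟨(cnt.getD i 0, F[i]), hq, hz, ?_⟩
      have : rhsE F i = F[i].2 := by rw [rhsE, List.getD_eq_getElem _ _ hi]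
      rw [← this]
      exact hb
  rcases bfs_inv F _ (fun a => occ_getD_spec F a) X hX cnt st1.1 st1.2 hsound1 hinv with
    ⟨c1, c2, c3, c4⟩
  refine ⟨c2, ?_, c3, c4⟩
  intro x hx
  apply c1
  exact (hmem1 x).mpr (Or.inl hx)

-- both closures have the same element set, hence the same size
theorem closure_len_eq (R : List String) (F : List (List String × List String))
    (S : List String) : ((closureA R F S).length : Int) = closureSizeB F S := by
  rcases closureB_props F S (closureA R F S) (closureA_closed R F S)
    (closureA_subset R F S) with ⟨res, hlen, hnd, hsub, hcl, hsound⟩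
  have hmemiff : ∀ x, x ∈ closureA R F S ↔ x ∈ res := by
    intro x
    constructor
    · intro hx
      exact closureA_sound R F S res hcl hsub x hx
    · intro hx
      exact hsound x hx
  have hperm := (List.perm_ext_iff_of_nodup (closureA_nodup R F S) hnd).mpr hmemiff
  rw [hlen]
  have hl : PySem.Set.len res = (res.length : Int) := rfl
  rw [hl, hperm.length_eq]

-- ---------- combinatorics: A's pruning fold = B's minimality filter ----------

theorem mem_combos (xs : List String) (r : Nat) (S : List String) :
    S ∈ combos xs r ↔ S.Sublist xs ∧ S.length = r := by
  induction xs generalizing r S with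
  | nil =>
    cases r with
    | zero => simp [combos, List.length_eq_zero_iff, eq_comm]
    | succ m =>
      simp only [combos, List.not_mem_nil, false_iff, not_and]
      intro h
      rw [List.sublist_nil.mp h]
      simp
  | cons x rest ih =>
    cases r with
    | zero =>
      simp only [combos, List.mem_singleton]
      constructor
      · rintro rfl; exact ⟨List.nil_sublist _, rfl⟩
      · rintro ⟨_, hl⟩; exact (List.length_eq_zero_iff.mp hl)
    | succ m =>
      simp only [combos, List.mem_append, List.mem_map]
      constructor
      · rintro (⟨T, hT, rfl⟩ | hS)
        · rcases (ih m T).mp hT with ⟨hsub, hlen⟩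
          exact ⟨List.cons_sublist_cons.mpr hsub, by simp [hlen]⟩
        · rcases (ih (m + 1) S).mp hS with ⟨hsub, hlen⟩
          exact ⟨hsub.trans (List.sublist_cons_self x rest), hlen⟩
      · rintro ⟨hsub, hlen⟩
        rcases List.sublist_cons_iff.mp hsub with hs | ⟨T, rfl, hT⟩
        · exact Or.inr ((ih (m + 1) S).mpr ⟨hs, hlen⟩)
        · exact Or.inl ⟨T, (ih m T).mpr ⟨hT, by simpa using hlen⟩, rfl⟩

theorem pyLtSet_iff (U S : List String) :
    pyLtSet (PySem.Set.ofList U) (PySem.Set.ofList S) = true ↔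
      ((∀ x ∈ U, x ∈ S) ∧ ¬ (∀ x ∈ S, x ∈ U)) := by
  unfold pyLtSet
  rw [Bool.and_eq_true, Bool.not_eq_true', ← Bool.not_eq_true]
  rw [PySem.Set.issubset_iff, PySem.Set.issubset_iff]
  constructor
  · rintro ⟨h1, h2⟩
    exact ⟨fun x hx => (PySem.Set.mem_ofList _ _).mp
        (h1 x ((PySem.Set.mem_ofList _ _).mpr hx)),
      fun hc => h2 (fun x hx => (PySem.Set.mem_ofList _ _).mpr
        (hc x ((PySem.Set.mem_ofList _ _).mp hx)))⟩
  · rintro ⟨h1, h2⟩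
    exact ⟨fun x hx => (PySem.Set.mem_ofList _ _).mpr
        (h1 x ((PySem.Set.mem_ofList _ _).mp hx)),
      fun hc => h2 (fun x hx => (PySem.Set.mem_ofList _ _).mp
        (hc x ((PySem.Set.mem_ofList _ _).mpr hx)))⟩

-- S is a superkey in the sense of A's test
def SKn (Rs : List String) (F : List (List String × List String)) (S : List String) : Prop :=
  (closureA Rs F S).length = Rs.length

-- B's local test, semantically
def MinP (Rs : List String) (F : List (List String × List String)) (S : List String) : Prop :=
  SKn Rs F S ∧ (S.length = 1 ∨ ∀ i < S.length, ¬ SKn Rs F (S.eraseIdx i))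

-- A's fold body, named
def fA (Rs : List String) (F : List (List String × List String))
    (candidateKeys : List (PySem.Set String)) (S : List String) : List (PySem.Set String) :=
  if (closureA Rs F S).length = Rs.length then
    if candidateKeys.any (fun candidate => pyLtSet candidate (PySem.Set.ofList S)) then
      candidateKeys
    else candidateKeys ++ [PySem.Set.ofList S]
  else candidateKeys

-- B's filter test, named
def testb (Rs : List String) (F : List (List String × List String)) (S : List String) : Bool :=
  (closureSizeB F S == (Rs.length : Int)) && isMinimalB F S (Rs.length : Int)

def Ek (Rs : List String) (k : Nat) : List (List String) :=
  (PySem.List.pyRange 1 ((k : Int) + 1) 1).flatMap (fun r => combos Rs r.toNat)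

theorem testb_iff (Rs : List String) (F : List (List String × List String)) (S : List String) :
    testb Rs F S = true ↔ MinP Rs F S := by
  unfold testb isMinimalB MinP SKn
  simp only [← closure_len_eq Rs F]
  rw [Bool.and_eq_true, beq_iff_eq, Nat.cast_inj]
  constructor
  · rintro ⟨h1, h2⟩
    refine ⟨h1, ?_⟩
    by_cases hl : S.length = 1
    · exact Or.inl hl
    · right
      rw [if_neg (by simpa using hl)] at h2
      intro i hi
      have := List.all_eq_true.mp h2 i (List.mem_range.mpr hi)
      simp only [Bool.not_eq_eq_eq_not, Bool.not_true, beq_eq_false_iff_ne] at this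
      intro hc
      exact this (by exact_mod_cast hc)
  · rintro ⟨h1, h2⟩
    refine ⟨h1, ?_⟩
    rcases h2 with hl | hall
    · rw [if_pos (by simpa using hl)]
    · by_cases hl : S.length = 1
      · rw [if_pos (by simpa using hl)]
      · rw [if_neg (by simpa using hl)]
        apply List.all_eq_true.mpr
        intro i hi
        have := hall i (List.mem_range.mp hi)
        simp only [Bool.not_eq_eq_eq_not, Bool.not_true, beq_eq_false_iff_ne]
        intro hc
        exact this (by exact_mod_cast hc)

theorem pvClosure_mono (Rs : List String) (F : List (List String × List String))
    (U T : List String) (h : ∀ x ∈ U, x ∈ T) :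
    ∀ y ∈ closureA Rs F U, y ∈ closureA Rs F T := by
  apply closureA_sound Rs F U _ (closureA_closed Rs F T)
  intro x hx
  exact closureA_subset Rs F T x (h x hx)

theorem pvClosure_len_mono (Rs : List String) (F : List (List String × List String))
    (U T : List String) (h : ∀ x ∈ U, x ∈ T) :
    (closureA Rs F U).length ≤ (closureA Rs F T).length :=
  nodup_length_le _ _ (closureA_nodup Rs F U) (fun x hx => pvClosure_mono Rs F U T h x hx)

theorem SK_sandwich (Rs : List String) (F : List (List String × List String))
    (U T S : List String) (hUT : ∀ x ∈ U, x ∈ T) (hTS : ∀ x ∈ T, x ∈ S)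
    (hU : SKn Rs F U) (hS : SKn Rs F S) : SKn Rs F T := by
  have h1 := pvClosure_len_mono Rs F U T hUT
  have h2 := pvClosure_len_mono Rs F T S hTS
  unfold SKn at *
  omega

-- every superkey contains a minimal one
theorem exists_min (Rs : List String) (F : List (List String × List String)) :
    ∀ (n : Nat) (T : List String), T.length ≤ n → T.Sublist Rs → T ≠ [] → SKn Rs F T →
    ∃ U, U.Sublist Rs ∧ U ≠ [] ∧ U.length ≤ T.length ∧ (∀ x ∈ U, x ∈ T) ∧ MinP Rs F U := by
  intro n
  induction n with
  | zero =>
    intro T hlen hsub hne _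
    exact absurd (List.length_eq_zero_iff.mp (by omega)) hne
  | succ m ih =>
    intro T hlen hsub hne hSK
    by_cases hmin : MinP Rs F T
    · exact ⟨T, hsub, hne, le_rfl, fun x hx => hx, hmin⟩
    · have : ¬ (T.length = 1 ∨ ∀ i < T.length, ¬ SKn Rs F (T.eraseIdx i)) := by
        intro hc
        exact hmin ⟨hSK, hc⟩
      push_neg at this
      rcases this with ⟨hne1, i, hi, hSKi⟩
      have hTpos : 0 < T.length := List.length_pos_iff.mpr hne
      have hTlen : (T.eraseIdx i).length = T.length - 1 := by
        rw [List.length_eraseIdx_of_lt hi]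
      have hT2 : 2 ≤ T.length := by omega
      rcases ih (T.eraseIdx i) (by omega) ((List.eraseIdx_sublist T i).trans hsub)
          (by intro hc; rw [hc] at hTlen; simp at hTlen; omega) hSKi with
        ⟨U, u1, u2, u3, u4, u5⟩
      exact ⟨U, u1, u2, by omega,
        fun x hx => (List.eraseIdx_sublist T i).subset (u4 x hx), u5⟩

-- THE core lemma: A's pruning test against the previously found keys is exactly
-- the failure of B's remove-one minimality test
theorem prune_iff (Rs : List String) (F : List (List String × List String))
    (hRs : Rs.Nodup) (S : List String) (hS : S.Sublist Rs) (hpos : S ≠ [])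
    (hSK : SKn Rs F S) :
    (∃ U, U.Sublist Rs ∧ U ≠ [] ∧ U.length < S.length ∧ MinP Rs F U ∧
      (∀ x ∈ U, x ∈ S) ∧ ¬ (∀ x ∈ S, x ∈ U)) ↔
    (S.length ≠ 1 ∧ ∃ i, i < S.length ∧ SKn Rs F (S.eraseIdx i)) := by
  have hSnd : S.Nodup := hS.nodup hRs
  constructor
  · rintro ⟨U, u1, u2, u3, u4, u5, u6⟩
    have hUnd : U.Nodup := u1.nodup hRs
    have hU1 : 1 ≤ U.length := List.length_pos_iff.mpr u2
    refine ⟨by omega, ?_⟩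
    push_neg at u6
    rcases u6 with ⟨x, hxS, hxU⟩
    rcases List.getElem_of_mem hxS with ⟨i, hi, rfl⟩
    refine ⟨i, hi, ?_⟩
    refine SK_sandwich Rs F U (S.eraseIdx i) S ?_ ?_ u4.1 hSK
    · intro y hy
      exact (mem_eraseIdx_of_nodup S i hi hSnd y).mpr
        ⟨u5 y hy, fun he => hxU (he ▸ hy)⟩
    · intro y hy
      exact ((mem_eraseIdx_of_nodup S i hi hSnd y).mp hy).1
  · rintro ⟨hne1, i, hi, hSKi⟩
    have hT2 : 2 ≤ S.length := by
      have := List.length_pos_iff.mpr hpos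
      omega
    have hTlen : (S.eraseIdx i).length = S.length - 1 := by
      rw [List.length_eraseIdx_of_lt hi]
    rcases exists_min Rs F (S.eraseIdx i).length (S.eraseIdx i) le_rfl
        ((List.eraseIdx_sublist S i).trans hS)
        (by intro hc; rw [hc] at hTlen; simp at hTlen; omega) hSKi with
      ⟨U, u1, u2, u3, u4, u5⟩
    refine ⟨U, u1, u2, by omega, u5, ?_, ?_⟩
    · intro x hx
      exact (List.eraseIdx_sublist S i).subset (u4 x hx)
    · intro hc
      have := nodup_length_le S U hSnd hc
      omega

theorem mem_Ek (Rs : List String) (k : Nat) (S : List String) :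
    S ∈ Ek Rs k ↔ S.Sublist Rs ∧ 1 ≤ S.length ∧ S.length ≤ k := by
  unfold Ek
  rw [List.mem_flatMap]
  constructor
  · rintro ⟨r, hr, hS⟩
    rcases PySem.List.mem_pyRange_one.mp hr with ⟨hr1, hr2⟩
    rcases (mem_combos Rs r.toNat S).mp hS with ⟨hsub, hlen⟩
    refine ⟨hsub, by omega, by omega⟩
  · rintro ⟨hsub, h1, h2⟩
    refine ⟨(S.length : Int), PySem.List.mem_pyRange_one.mpr ⟨by omega, by omega⟩, ?_⟩
    exact (mem_combos Rs S.length S).mpr ⟨hsub, by simp⟩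

theorem Ek_succ (Rs : List String) (k : Nat) :
    Ek Rs (k + 1) = Ek Rs k ++ combos Rs (k + 1) := by
  unfold Ek
  have : ((k + 1 : Nat) : Int) + 1 = (((k : Int) + 1) + 1) := by push_cast; ring
  rw [this, PySem.List.pyRange_one_succ_right (by omega), List.flatMap_append]
  have h2 : ((k : Int) + 1).toNat = k + 1 := by omega
  simp [h2]

-- one block of A's fold, sizes all k+1, against the already-collected smaller keys
theorem blockA (Rs : List String) (F : List (List String × List String)) (hRs : Rs.Nodup)
    (k : Nat) :
    ∀ (L : List (List String)) (ext : List (List String)),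
    (∀ S ∈ L, S.Sublist Rs ∧ S.length = k + 1) →
    (∀ T ∈ ext, T.Sublist Rs ∧ T.length = k + 1 ∧ testb Rs F T = true) →
    L.foldl (fA Rs F)
        (((Ek Rs k).filter (testb Rs F)).map PySem.Set.ofList ++ ext.map PySem.Set.ofList) =
      ((Ek Rs k).filter (testb Rs F)).map PySem.Set.ofList ++
        (ext ++ L.filter (testb Rs F)).map PySem.Set.ofList := by
  intro L
  induction L with
  | nil => intro ext _ _; simp
  | cons S L ih =>
    intro ext hL hext
    rcases hL S List.mem_cons_self with ⟨hSsub, hSlen⟩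
    have hSnd : S.Nodup := hSsub.nodup hRs
    have hSne : S ≠ [] := by intro hc; rw [hc] at hSlen; simp at hSlen
    simp only [List.foldl_cons, List.filter_cons]
    by_cases hsk : (closureA Rs F S).length = Rs.length
    · have hany : (((Ek Rs k).filter (testb Rs F)).map PySem.Set.ofList ++
          ext.map PySem.Set.ofList).any (fun candidate => pyLtSet candidate
            (PySem.Set.ofList S)) = true ↔
          (S.length ≠ 1 ∧ ∃ i, i < S.length ∧ SKn Rs F (S.eraseIdx i)) := by
        rw [← prune_iff Rs F hRs S hSsub hSne hsk]
        rw [List.any_eq_true]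
        constructor
        · rintro ⟨c, hc, hlt⟩
          rcases List.mem_append.mp hc with hc | hc
          · rcases List.mem_map.mp hc with ⟨U, hUf, rfl⟩
            rcases List.mem_filter.mp hUf with ⟨hUE, hUt⟩
            rcases (mem_Ek Rs k U).mp hUE with ⟨hUsub, hU1, hUk⟩
            have hUmin := (testb_iff Rs F U).mp hUt
            rcases (pyLtSet_iff U S).mp hlt with ⟨hsub2, hproper⟩
            have hUnd : U.Nodup := hUsub.nodup hRs
            have hlt2 : U.length < S.length := by
              have hle := nodup_length_le U S hUnd hsub2
              rcases Nat.lt_or_ge U.length S.length with h | h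
              · exact h
              · exact absurd (nodup_subset_antisymm U S hUnd hSnd hsub2 (by omega))
                  hproper
            have hUne : U ≠ [] := by
              intro hc2
              rw [hc2] at hU1
              simp at hU1
            exact ⟨U, hUsub, hUne, hlt2, hUmin, hsub2, hproper⟩
          · rcases List.mem_map.mp hc with ⟨T, hTf, rfl⟩
            rcases hext T hTf with ⟨hTsub, hTlen, hTt⟩
            rcases (pyLtSet_iff T S).mp hlt with ⟨hsub2, hproper⟩
            have hTnd : T.Nodup := hTsub.nodup hRs
            exact absurd (nodup_subset_antisymm T S hTnd hSnd hsub2 (by omega)) hproper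
        · rintro ⟨U, u1, u2, u3, u4, u5, u6⟩
          have hU1 : 1 ≤ U.length := List.length_pos_iff.mpr u2
          refine ⟨PySem.Set.ofList U, List.mem_append.mpr (Or.inl ?_), ?_⟩
          · exact List.mem_map.mpr ⟨U, List.mem_filter.mpr
              ⟨(mem_Ek Rs k U).mpr ⟨u1, hU1, by omega⟩, (testb_iff Rs F U).mpr u4⟩, rfl⟩
          · exact (pyLtSet_iff U S).mpr ⟨u5, u6⟩
      by_cases hpr : (S.length ≠ 1 ∧ ∃ i, i < S.length ∧ SKn Rs F (S.eraseIdx i))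
      · have hstep : fA Rs F (((Ek Rs k).filter (testb Rs F)).map PySem.Set.ofList ++
            ext.map PySem.Set.ofList) S =
            (((Ek Rs k).filter (testb Rs F)).map PySem.Set.ofList ++
              ext.map PySem.Set.ofList) := by
          unfold fA
          rw [if_pos hsk, if_pos (hany.mpr hpr)]
        rw [hstep]
        have htf : testb Rs F S = false := by
          rw [← Bool.not_eq_true, testb_iff]
          rintro ⟨_, hmin⟩
          rcases hmin with h1 | h2
          · exact hpr.1 h1
          · rcases hpr.2 with ⟨i, hi, hski⟩
            exact h2 i hi hski
        rw [htf]
        simp only [Bool.false_eq_true, if_false]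
        exact ih ext (fun T hT => hL T (List.mem_cons_of_mem _ hT)) hext
      · have hstep : fA Rs F (((Ek Rs k).filter (testb Rs F)).map PySem.Set.ofList ++
            ext.map PySem.Set.ofList) S =
            (((Ek Rs k).filter (testb Rs F)).map PySem.Set.ofList ++
              ext.map PySem.Set.ofList) ++ [PySem.Set.ofList S] := by
          unfold fA
          rw [if_pos hsk, if_neg (fun hc => hpr (hany.mp hc))]
        rw [hstep]
        have htt : testb Rs F S = true := by
          rw [testb_iff]
          refine ⟨hsk, ?_⟩
          by_cases h1 : S.length = 1
          · exact Or.inl h1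
          · right
            intro i hi hski
            exact hpr ⟨h1, i, hi, hski⟩
        rw [htt, if_pos rfl]
        have := ih (ext ++ [S]) (fun T hT => hL T (List.mem_cons_of_mem _ hT))
          (by
            intro T hT
            rcases List.mem_append.mp hT with hT | hT
            · exact hext T hT
            · rw [List.mem_singleton.mp hT]
              exact ⟨hSsub, hSlen, htt⟩)
        simp only [List.map_append, List.map_cons, List.map_nil,
          ← List.append_assoc] at this
        rw [this]
        simp
    · have hstep : fA Rs F (((Ek Rs k).filter (testb Rs F)).map PySem.Set.ofList ++
          ext.map PySem.Set.ofList) S =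
          (((Ek Rs k).filter (testb Rs F)).map PySem.Set.ofList ++
            ext.map PySem.Set.ofList) := by
        unfold fA
        rw [if_neg hsk]
      rw [hstep]
      have htf : testb Rs F S = false := by
        rw [← Bool.not_eq_true, testb_iff]
        rintro ⟨hc, _⟩
        exact hsk hc
      rw [htf]
      simp only [Bool.false_eq_true, if_false]
      exact ih ext (fun T hT => hL T (List.mem_cons_of_mem _ hT)) hext

theorem foldA_eq (Rs : List String) (F : List (List String × List String)) (hRs : Rs.Nodup) :
    ∀ k : Nat, (Ek Rs k).foldl (fA Rs F) [] =
      ((Ek Rs k).filter (testb Rs F)).map PySem.Set.ofList := by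
  intro k
  induction k with
  | zero =>
    have h0 : Ek Rs 0 = [] := by
      unfold Ek
      have h1 : PySem.List.pyRange 1 (((0 : Nat) : Int) + 1) 1 = [] := by decide
      rw [h1]
      rfl
    rw [h0]
    rfl
  | succ k ih =>
    rw [Ek_succ, List.foldl_append, ih, List.filter_append, List.map_append]
    have := blockA Rs F hRs k (combos Rs (k + 1)) []
      (fun S hS => (mem_combos Rs (k + 1) S).mp hS)
      (fun T hT => absurd hT (by simp))
    simpa using this

-- ===== VERDICT (by name: the statement is the Claim_ definition above) =====
theorem candidate_keys_spec : Claim_equal_candidate_keys := by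
  intro R F _ hPre
  unfold Spec_candidate_keys candidate_keys candidate_keys_alt
  have hRs : (PySem.List.sorted R (fun x => x) false).Nodup :=
    ((PySem.List.sorted_perm R (fun x => x) false).nodup_iff).mpr hPre
  show (Ek (PySem.List.sorted R (fun x => x) false)
      (PySem.List.sorted R (fun x => x) false).length).foldl
      (fA (PySem.List.sorted R (fun x => x) false) F) [] =
    ((Ek (PySem.List.sorted R (fun x => x) false)
        (PySem.List.sorted R (fun x => x) false).length).filter
      (testb (PySem.List.sorted R (fun x => x) false) F)).map PySem.Set.ofList
  exact foldA_eq (PySem.List.sorted R (fun x => x) false) F hRs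
    (PySem.List.sorted R (fun x => x) false).length
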